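-- pv_equiv track=rewrite | github.com/dereklwin/Foorbar-Minion-s-bored-game | answer.py | answer
-- ===== SOURCE A (Python) =====
-- def answer(t, n):
--     # no possible path to win
--     if n-1>t:
--         return 0
--     # there is only one way to win. move right until end
--     if n-1 == t:
--         return 1
--     # when n =2 or n==t there is t possible ways to win
--     if n==2 or n==t:
--         return t
--     # when n is 3, there is a unique solution since you can only move left
--     # on the middle path
--     if n==3:
--         return (2**(t-1)-1)%123454321
--     # when n is 4, it is the sum of the pervious values
--     if n==4:
--         return (2*(answer(t-1,n))+answer(t-2,n)+t-2)%123454321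
--     # all other cases are solved using trinomial expansion
--     else:
--
--         parentList = [1,1]
--         childList = []
--         total = 0
--         for i in range(1,t-1):
--             childList = []
--
--             j=0
--             for j in range(0,n-1):
--                 # first entry sum on the first and second of parent list
--                 if j == 0:
--                     childList.append(parentList[j] + parentList[j + 1])
--                 # all other entries, attempt to use trinomial expansion of parent list
--                 elif j<i+1:
--                     # parent does not have a j+1 entry
--                     if j+1>len(parentList)-1:
--                         childList.append(parentList[j - 1] + parentList[j])
--                     # trinomial expansion of the sums
--                     else:
--                         childList.append(parentList[j - 1] + parentList[j] + parentList[j + 1])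
--                 # set entry for the end of the expansion to 1 if current list size is
--                 # between parentlist size and n-1
--                 elif j==i+1:
--                     childList.append(1)
--
--                 # sum all entries in column
--                 if len(childList)==n-1:
--                     total += childList[-1]
--
--             parentList = childList
--
--     return total % 123454321
-- ===== SOURCE B (Python) =====
-- def answer(t, n):
--     M = 123454321
--     if n - 1 > t:
--         return 0
--     if n - 1 == t:
--         return 1
--     if n == 2 or n == t:
--         return t
--     if n == 3:
--         return (pow(2, t - 1, M) - 1) % M
--     if n == 4:
--         a, b = 1, 4
--         for i in range(5, t + 1):
--             a, b = b, (2 * b + a + i - 2) % M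
--         return b
--     total = 0
--     row = [1, 1]
--     for i in range(1, t - 1):
--         w = min(i + 2, n - 1)
--         q = [0] + row + [0, 0]
--         row = [q[j] + q[j + 1] + q[j + 2] for j in range(w)]
--         if row and len(row) == n - 1:
--             total += row[-1]
--     return total % M
-- ===== Notes on version B (the rewrite author's own statement) =====
-- stated objective: alternative
-- what changed: Replaced A's memoless double recursion for n=4 by a bottom-up two-variable loop, A's full-width 2**(t-1) by three-argument modular pow, and A's branchy trinomial-row construction by a uniform three-window sum over an explicitly zero-padded row; on the general branch the cost is unchanged.
import Mathlib
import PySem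

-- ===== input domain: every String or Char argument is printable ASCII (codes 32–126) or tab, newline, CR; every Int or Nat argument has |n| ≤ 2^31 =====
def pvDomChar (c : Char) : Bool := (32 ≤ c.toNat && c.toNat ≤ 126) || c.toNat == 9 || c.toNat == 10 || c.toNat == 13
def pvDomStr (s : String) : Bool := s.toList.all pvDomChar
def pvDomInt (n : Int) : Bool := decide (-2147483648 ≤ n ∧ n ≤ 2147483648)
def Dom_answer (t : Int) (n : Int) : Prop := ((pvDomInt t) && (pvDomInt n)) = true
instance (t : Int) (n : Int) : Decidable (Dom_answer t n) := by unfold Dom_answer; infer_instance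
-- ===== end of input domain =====

-- B replaces A's double recursion for n=4 by a bottom-up two-variable loop, A's full 2**(t-1) by
-- three-argument modular pow, and A's branchy trinomial-row construction by a uniform zero-padded
-- convolution (alternative structure, same cost on the general branch).

-- ===== PORT A =====
-- xs[k] (possibly negative k); every access in either program is in range on reachable states
def pg (xs : List Int) (k : Int) : Int := PySem.List.pyGetD xs k 0

-- body of A's inner `for j in range(0, n-1)` loop; state = (childList, total)
def answerInnerA (n : Int) (p : List Int) (i : Int) (st : List Int × Int) (j : Int) : List Int × Int :=
  let child := st.1
  let child :=
    if j = 0 then child ++ [pg p j + pg p (j + 1)]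
    else if j < i + 1 then
      (if j + 1 > (p.length : Int) - 1 then child ++ [pg p (j - 1) + pg p j]
       else child ++ [pg p (j - 1) + pg p j + pg p (j + 1)])
    else if j = i + 1 then child ++ [1]
    else child
  let total := if (child.length : Int) = n - 1 then st.2 + pg child (-1) else st.2
  (child, total)

-- body of A's outer `for i in range(1, t-1)` loop; state = (parentList, total)
def answerOuterA (n : Int) (st : List Int × Int) (i : Int) : List Int × Int :=
  (PySem.List.pyRange 0 (n - 1) 1).foldl (answerInnerA n st.1 i) ([], st.2)

def answer (t : Int) (n : Int) : Int :=
  if h1 : n - 1 > t then 0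
  else if h2 : n - 1 = t then 1
  else if h3 : n = 2 ∨ n = t then t
  else if n = 3 then (2 ^ (t - 1).toNat - 1) % 123454321   -- 2**(t-1): here t ≥ 4, exponent nonneg
  else if h5 : n = 4 then (2 * answer (t - 1) n + answer (t - 2) n + t - 2) % 123454321
  else ((PySem.List.pyRange 1 (t - 1) 1).foldl (answerOuterA n) ([1, 1], 0)).2 % 123454321
termination_by t.toNat
decreasing_by
  all_goals omega

-- ===== PORT B =====
-- q[j] + q[j+1] + q[j+2]
def convVal (q : List Int) (j : Int) : Int := pg q j + pg q (j + 1) + pg q (j + 2)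

-- q = [0] + row + [0, 0]; [q[j] + q[j+1] + q[j+2] for j in range(w)]
def answerAltConv (p : List Int) (w : Int) : List Int :=
  (PySem.List.pyRange 0 w 1).map (convVal ([0] ++ p ++ [0, 0]))

-- body of B's `for i in range(1, t-1)` loop; state = (row, total)
def answerAltStep (n : Int) (st : List Int × Int) (i : Int) : List Int × Int :=
  let w := min (i + 2) (n - 1)
  let row := answerAltConv st.1 w
  let total := if row ≠ [] ∧ (row.length : Int) = n - 1 then st.2 + pg row (-1) else st.2
  (row, total)

def answer_alt (t : Int) (n : Int) : Int :=
  if n - 1 > t then 0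
  else if n - 1 = t then 1
  else if n = 2 ∨ n = t then t
  else if n = 3 then (PySem.Int.powMod 2 (t - 1).toNat 123454321 - 1) % 123454321
  else if n = 4 then
    ((PySem.List.pyRange 5 (t + 1) 1).foldl
      (fun (st : Int × Int) i => (st.2, (2 * st.2 + st.1 + i - 2) % 123454321)) (1, 4)).2
  else ((PySem.List.pyRange 1 (t - 1) 1).foldl (answerAltStep n) ([1, 1], 0)).2 % 123454321

-- ===== PRECONDITION & SPEC =====
def Spec_answer (t : Int) (n : Int) (out : Int) : Prop := out = answer_alt t n
instance (t : Int) (n : Int) (out : Int) : Decidable (Spec_answer t n out) := by unfold Spec_answer; infer_instance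

-- ===== CLAIM (what is proved, stated in full; the proofs are below) =====
def Claim_equal_answer : Prop := ∀ (t : Int) (n : Int), Dom_answer t n → Spec_answer t n (answer t n)

-- ===== LEMMAS AND PROOFS =====

-- (n = 3 branch) (2^e - 1) % M = (2^e % M - 1) % M
lemma pow_sub_one_mod (e : Nat) :
    ((2 : Int) ^ e - 1) % 123454321 = (PySem.Int.powMod 2 e 123454321 - 1) % 123454321 := by
  rw [PySem.Int.powMod_eq_emod 2 e (by norm_num)]
  conv_lhs => rw [Int.sub_emod]
  norm_num

lemma answer_unfold (t n : Int) : answer t n =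
    (if n - 1 > t then 0
     else if n - 1 = t then 1
     else if n = 2 ∨ n = t then t
     else if n = 3 then (2 ^ (t - 1).toNat - 1) % 123454321
     else if n = 4 then (2 * answer (t - 1) n + answer (t - 2) n + t - 2) % 123454321
     else ((PySem.List.pyRange 1 (t - 1) 1).foldl (answerOuterA n) ([1, 1], 0)).2 % 123454321) := by
  rw [answer]
  split_ifs <;> rfl

lemma answer_three_four : answer 3 4 = 1 := by
  rw [answer_unfold]; norm_num

lemma answer_four_four : answer 4 4 = 4 := by
  rw [answer_unfold]; norm_num

lemma answer_four_rec (t : Int) (ht : 5 ≤ t) :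
    answer t 4 = (2 * answer (t - 1) 4 + answer (t - 2) 4 + t - 2) % 123454321 := by
  rw [answer_unfold]
  rw [if_neg (by omega), if_neg (by omega), if_neg (by omega), if_neg (by omega), if_pos rfl]

-- (n = 4 branch) the DP pair is (answer (t-1) 4, answer t 4)
lemma loop4_spec : ∀ t : Int, 4 ≤ t →
    (PySem.List.pyRange 5 (t + 1) 1).foldl
      (fun (st : Int × Int) i => (st.2, (2 * st.2 + st.1 + i - 2) % 123454321)) (1, 4)
      = (answer (t - 1) 4, answer t 4) := by
  intro t ht
  induction t, ht using Int.le_induction with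
  | base =>
      rw [PySem.List.pyRange_one_eq_nil (by omega)]
      show (1, 4) = (answer (4 - 1) 4, answer 4 4)
      norm_num [answer_three_four, answer_four_four]
  | succ m hm ih =>
      rw [show m + 1 + 1 = (m + 1) + 1 from rfl,
          PySem.List.pyRange_one_succ_right (by omega), List.foldl_append, ih]
      simp only [List.foldl_cons, List.foldl_nil]
      rw [answer_four_rec (m + 1) (by omega),
          show m + 1 - 1 = m from by omega, show m + 1 - 2 = m - 1 from by omega]

-- a fold whose step preserves the second component
lemma foldl_snd_const (f : (List Int × Int) → Int → (List Int × Int))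
    (h : ∀ st x, (f st x).2 = st.2) : ∀ (l : List Int) st, (l.foldl f st).2 = st.2 := by
  intro l
  induction l with
  | nil => intro st; rfl
  | cons x xs ih => intro st; rw [List.foldl_cons, ih, h]

lemma conv_len (p : List Int) (w : Int) (hw : 0 ≤ w) :
    ((answerAltConv p w).length : Int) = w := by
  simp [answerAltConv, PySem.List.length_pyRange_one]
  omega

lemma conv_snoc (p : List Int) (c : Int) (hc : 0 ≤ c) :
    answerAltConv p (c + 1) = answerAltConv p c ++ [convVal ([0] ++ p ++ [0, 0]) c] := by
  unfold answerAltConv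
  rw [PySem.List.pyRange_one_succ_right hc, List.map_append]
  rfl

lemma conv_get (p : List Int) (w j : Int) (h0 : 0 ≤ j) (hj : j < w) :
    pg (answerAltConv p w) j = convVal ([0] ++ p ++ [0, 0]) j := by
  unfold pg answerAltConv
  exact PySem.List.pyGetD_map_pyRange_of_nonneg _ _ _ _ h0 hj

-- indexing into B's zero-padded row [0] + p + [0, 0]
lemma pg_pad_lo (p : List Int) : pg ([0] ++ p ++ [0, 0]) 0 = 0 := by
  simp [pg, PySem.List.pyGetD_zero_cons]

lemma pg_pad_mid (p : List Int) (k : Int) (h0 : 1 ≤ k) (hk : k ≤ (p.length : Int)) :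
    pg ([0] ++ p ++ [0, 0]) k = pg p (k - 1) := by
  unfold pg
  rw [PySem.List.pyGetD_eq_getElem ([0] ++ p ++ [0, 0]) 0 (by omega) (by simp; omega),
      PySem.List.pyGetD_eq_getElem p 0 (by omega) (by omega)]
  have h3 : k.toNat = (k - 1).toNat + 1 := by omega
  simp only [List.singleton_append, h3]
  rw [List.getElem_append_left (by simp; omega)]
  simp [List.getElem_cons_succ]

lemma pg_pad_hi (p : List Int) (k : Int) (h1 : (p.length : Int) + 1 ≤ k)
    (h2 : k ≤ (p.length : Int) + 2) :
    pg ([0] ++ p ++ [0, 0]) k = 0 := by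
  unfold pg
  rw [PySem.List.pyGetD_eq_getElem ([0] ++ p ++ [0, 0]) 0 (by omega) (by simp; omega)]
  have h3 : k.toNat = (k - 1).toNat + 1 := by omega
  simp only [List.singleton_append, h3]
  rw [List.getElem_append_right (by simp; omega)]
  have h : k.toNat - 1 - p.length = 0 ∨ k.toNat - 1 - p.length = 1 := by omega
  rcases h with h | h <;> simp [h]

-- value of B's convolution at the column indices A's inner loop reaches
lemma convVal_cases (n i : Int) (p : List Int) (m : Int)
    (hn : 5 ≤ n) (hi : 1 ≤ i)
    (hL : (p.length : Int) = min (i + 1) (n - 1))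
    (hlast : i + 2 ≤ n - 1 → pg p i = 1)
    (h0 : 0 ≤ m) (hm : m < min (i + 2) (n - 1)) :
    convVal ([0] ++ p ++ [0, 0]) m =
      (if m = 0 then pg p m + pg p (m + 1)
       else if m < i + 1 then
         (if m + 1 > (p.length : Int) - 1 then pg p (m - 1) + pg p m
          else pg p (m - 1) + pg p m + pg p (m + 1))
       else 1) := by
  unfold convVal
  by_cases hz : m = 0
  · subst hz
    rw [if_pos rfl, pg_pad_lo,
        pg_pad_mid p (0 + 1) (by omega) (by omega),
        pg_pad_mid p (0 + 2) (by omega) (by omega)]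
    norm_num
  · rw [if_neg hz]
    by_cases hlt : m < i + 1
    · rw [if_pos hlt, pg_pad_mid p m (by omega) (by omega)]
      by_cases hend : m + 1 > (p.length : Int) - 1
      · rw [if_pos hend, pg_pad_mid p (m + 1) (by omega) (by omega),
            pg_pad_hi p (m + 2) (by omega) (by omega),
            show m + 1 - 1 = m from by omega, add_zero]
      · rw [if_neg hend, pg_pad_mid p (m + 1) (by omega) (by omega),
            pg_pad_mid p (m + 2) (by omega) (by omega),
            show m + 1 - 1 = m from by omega, show m + 2 - 1 = m + 1 from by omega]
    · -- here m = i + 1 and the row is still growing: the single surviving term is p's last, 1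
      rw [if_neg hlt, pg_pad_mid p m (by omega) (by omega),
          pg_pad_hi p (m + 1) (by omega) (by omega),
          pg_pad_hi p (m + 2) (by omega) (by omega),
          show m - 1 = i from by omega, hlast (by omega)]
      norm_num

-- one executed step of A's inner loop appends exactly B's convolution value
lemma innerA_step_append (n i : Int) (p : List Int) (hn : 5 ≤ n) (hi : 1 ≤ i)
    (hL : (p.length : Int) = min (i + 1) (n - 1)) (hlast : i + 2 ≤ n - 1 → pg p i = 1)
    (m : Int) (h0 : 0 ≤ m) (hm : m < min (i + 2) (n - 1)) (C : List Int) (T : Int) :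
    answerInnerA n p i (C, T) m
      = (C ++ [convVal ([0] ++ p ++ [0, 0]) m],
         if ((C ++ [convVal ([0] ++ p ++ [0, 0]) m]).length : Int) = n - 1
         then T + pg (C ++ [convVal ([0] ++ p ++ [0, 0]) m]) (-1) else T) := by
  rw [convVal_cases n i p m hn hi hL hlast h0 hm]
  simp only [answerInnerA]
  by_cases hz : m = 0
  · simp only [if_pos hz]
  · simp only [if_neg hz]
    by_cases hlt : m < i + 1
    · simp only [if_pos hlt]
      by_cases hend : m + 1 > (p.length : Int) - 1
      · simp only [if_pos hend]
      · simp only [if_neg hend]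
    · simp only [if_neg hlt, if_pos (show m = i + 1 from by omega)]

-- a step of A's inner loop beyond the current width changes nothing
lemma innerA_step_skip (n i : Int) (p : List Int) (hn : 5 ≤ n) (hi : 1 ≤ i)
    (m : Int) (hm : min (i + 2) (n - 1) ≤ m) (hm2 : m ≤ n - 2) (C : List Int) (T : Int)
    (hC : (C.length : Int) = min (i + 2) (n - 1)) :
    answerInnerA n p i (C, T) m = (C, T) := by
  have h1 : ¬ m = 0 := by omega
  have h2 : ¬ m < i + 1 := by omega
  have h3 : ¬ m = i + 1 := by omega
  have h4 : ¬ ((C.length : Int) = n - 1) := by omega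
  simp only [answerInnerA, if_neg h1, if_neg h2, if_neg h3, if_neg h4]

-- A's inner loop, stopped after the js in [0, m), against B's convolution prefix
lemma innerA_mid (n i : Int) (p : List Int) (tot : Int)
    (hn : 5 ≤ n) (hi : 1 ≤ i)
    (hL : (p.length : Int) = min (i + 1) (n - 1))
    (hlast : i + 2 ≤ n - 1 → pg p i = 1) :
    ∀ m : Int, 0 ≤ m → m ≤ n - 1 →
    (PySem.List.pyRange 0 m 1).foldl (answerInnerA n p i) ([], tot)
      = (answerAltConv p (min m (min (i + 2) (n - 1))),
         if m = n - 1 ∧ min (i + 2) (n - 1) = n - 1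
         then tot + pg (answerAltConv p (min (i + 2) (n - 1))) (-1) else tot) := by
  intro m hm0
  induction m, hm0 using Int.le_induction with
  | base =>
      intro _
      rw [PySem.List.pyRange_one_eq_nil (by omega),
          show min (0 : Int) (min (i + 2) (n - 1)) = 0 from by omega]
      simp only [List.foldl_nil]
      rw [if_neg (by omega : ¬((0 : Int) = n - 1 ∧ min (i + 2) (n - 1) = n - 1))]
      unfold answerAltConv
      rw [PySem.List.pyRange_one_eq_nil (by omega)]
      rfl
  | succ m hm ih =>
      intro hm1
      rw [PySem.List.pyRange_one_succ_right (by omega), List.foldl_append, ih (by omega)]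
      simp only [List.foldl_cons, List.foldl_nil]
      rw [if_neg (by omega : ¬(m = n - 1 ∧ min (i + 2) (n - 1) = n - 1))]
      by_cases hcw : m < min (i + 2) (n - 1)
      · rw [show min m (min (i + 2) (n - 1)) = m from by omega,
            innerA_step_append n i p hn hi hL hlast m (by omega) hcw,
            ← conv_snoc p m (by omega),
            show min (m + 1) (min (i + 2) (n - 1)) = m + 1 from by omega,
            conv_len p (m + 1) (by omega)]
        by_cases hfin : m + 1 = n - 1
        · rw [if_pos hfin, if_pos (⟨hfin, by omega⟩ : m + 1 = n - 1 ∧ min (i + 2) (n - 1) = n - 1),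
              show min (i + 2) (n - 1) = m + 1 from by omega]
        · rw [if_neg hfin, if_neg (by omega : ¬(m + 1 = n - 1 ∧ min (i + 2) (n - 1) = n - 1))]
      · rw [show min m (min (i + 2) (n - 1)) = min (i + 2) (n - 1) from by omega,
            show min (m + 1) (min (i + 2) (n - 1)) = min (i + 2) (n - 1) from by omega,
            innerA_step_skip n i p hn hi m (by omega) (by omega) _ _
              (conv_len p _ (by omega)),
            if_neg (by omega : ¬(m + 1 = n - 1 ∧ min (i + 2) (n - 1) = n - 1))]

-- one full step of A's outer loop = one full step of B's loop
lemma innerA_eq (n i : Int) (p : List Int) (tot : Int)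
    (hn : 5 ≤ n) (hi : 1 ≤ i)
    (hL : (p.length : Int) = min (i + 1) (n - 1))
    (hlast : i + 2 ≤ n - 1 → pg p i = 1) :
    answerOuterA n (p, tot) i = answerAltStep n (p, tot) i := by
  have hlen := conv_len p (min (i + 2) (n - 1)) (by omega)
  have hne : answerAltConv p (min (i + 2) (n - 1)) ≠ [] := by
    intro h; rw [h] at hlen; simp at hlen; omega
  simp only [answerOuterA, answerAltStep]
  rw [innerA_mid n i p tot hn hi hL hlast (n - 1) (by omega) le_rfl,
      show min (n - 1) (min (i + 2) (n - 1)) = min (i + 2) (n - 1) from by omega]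
  by_cases hW : min (i + 2) (n - 1) = n - 1
  · rw [if_pos (⟨rfl, hW⟩ : (n - 1 : Int) = n - 1 ∧ min (i + 2) (n - 1) = n - 1),
        if_pos ⟨hne, hlen.trans hW⟩]
  · rw [if_neg (fun h => hW h.2), if_neg (fun h => hW (hlen.symm.trans h.2))]

-- outer loop invariant: states coincide, row has width min(m+1, n-1), trailing 1 while growing
lemma outer_inv (n : Int) (hn : 5 ≤ n) : ∀ m : Int, 1 ≤ m →
    ((PySem.List.pyRange 1 m 1).foldl (answerOuterA n) ([1, 1], 0)
       = (PySem.List.pyRange 1 m 1).foldl (answerAltStep n) ([1, 1], 0))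
    ∧ ((((PySem.List.pyRange 1 m 1).foldl (answerOuterA n) ([1, 1], 0)).1.length : Int)
        = min (m + 1) (n - 1))
    ∧ (m + 2 ≤ n - 1 →
        pg ((PySem.List.pyRange 1 m 1).foldl (answerOuterA n) ([1, 1], 0)).1 m = 1) := by
  intro m hm0
  induction m, hm0 using Int.le_induction with
  | base =>
      rw [PySem.List.pyRange_one_eq_nil le_rfl]
      simp only [List.foldl_nil]
      refine ⟨by trivial, by simp; omega, fun _ => by decide⟩
  | succ m hm ih =>
      obtain ⟨hEq, hLen, hLast⟩ := ih
      have key : (PySem.List.pyRange 1 (m + 1) 1).foldl (answerOuterA n) ([1, 1], 0)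
          = answerAltStep n ((PySem.List.pyRange 1 m 1).foldl (answerOuterA n) ([1, 1], 0)) m := by
        rw [PySem.List.pyRange_one_succ_right (by omega), List.foldl_append]
        simp only [List.foldl_cons, List.foldl_nil]
        rw [← Prod.mk.eta (p := (PySem.List.pyRange 1 m 1).foldl (answerOuterA n) ([1, 1], 0))]
        exact innerA_eq n m _ _ hn (by omega) hLen hLast
      have keyB : (PySem.List.pyRange 1 (m + 1) 1).foldl (answerAltStep n) ([1, 1], 0)
          = answerAltStep n ((PySem.List.pyRange 1 m 1).foldl (answerAltStep n) ([1, 1], 0)) m := by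
        rw [PySem.List.pyRange_one_succ_right (by omega), List.foldl_append]
        simp only [List.foldl_cons, List.foldl_nil]
      refine ⟨?_, ?_, ?_⟩
      · rw [key, keyB, hEq]
      · rw [key]
        simp only [answerAltStep]
        rw [conv_len _ _ (by omega)]
        omega
      · intro hgrow
        rw [key]
        simp only [answerAltStep]
        rw [show min (m + 2) (n - 1) = m + 2 from by omega,
            conv_get _ _ _ (by omega) (by omega),
            convVal_cases n m _ (m + 1) hn (by omega) hLen hLast (by omega) (by omega),
            if_neg (by omega : ¬(m + 1 : Int) = 0), if_neg (by omega : ¬(m + 1 < m + 1))]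


-- ===== VERDICT (by name: the statement is the Claim_ definition above) =====
theorem answer_spec : Claim_equal_answer := by
  unfold Claim_equal_answer
  intro t n _
  unfold Spec_answer answer_alt
  rw [answer_unfold]
  split_ifs with h1 h2 h3 h4 h5
  · rfl
  · rfl
  · rfl
  · exact pow_sub_one_mod (t - 1).toNat
  · obtain ⟨h3a, h3b⟩ := not_or.mp h3
    subst h5
    rw [loop4_spec t (by omega)]
    exact (answer_four_rec t (by omega)).symm
  · obtain ⟨h3a, h3b⟩ := not_or.mp h3
    by_cases hn5 : 5 ≤ n
    · rw [(outer_inv n hn5 (t - 1) (by omega)).1]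
    · -- here n ≤ 1: both loops never touch their accumulator and both sides are 0 % 123454321
      have hA : ∀ st x, (answerOuterA n st x).2 = st.2 := by
        intro st x
        unfold answerOuterA
        rw [PySem.List.pyRange_one_eq_nil (by omega)]
        rfl
      have hB : ∀ st x, (answerAltStep n st x).2 = st.2 := by
        intro st x
        have hrow : answerAltConv st.1 (min (x + 2) (n - 1)) = [] := by
          unfold answerAltConv
          rw [PySem.List.pyRange_one_eq_nil (by omega)]
          rfl
        simp only [answerAltStep, hrow]
        simp
      rw [foldl_snd_const (answerOuterA n) hA, foldl_snd_const (answerAltStep n) hB]
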